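-- pv_equiv track=rewrite | github.com/LukaszObst/AOC_2022 | day10/main.py | process_program
-- ===== SOURCE A (Python) =====
-- def inc_cycle_and_reg(cycle, increment, *, curr_val, curr_reg, watcher, cycles_to_watch, crt_arr):
--     for i in range(1, increment + 1):
--         cycle += 1
--         # increment reg value if necessary
--         if i == increment:
--             curr_reg += curr_val
--         # crt: lit pixel
--         if -1 <= (cycle - 1) % 40 - curr_reg <= 1:
--             crt_arr.append(cycle)
--         # remember special cycle values
--         if cycles_to_watch(cycle):
--             watcher[cycle] = curr_reg
--     return cycle, curr_reg
--
-- def watcher_rules(check_cycle):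
--     return check_cycle == 20 or (check_cycle - 20) % 40 == 0
--
-- def process_program(programm_code: str):
--     _x, cycle, _x_register = 1, 1, {}
--     _crt = [1]
--
--     for line in programm_code.splitlines():
--         match line.split():
--             case ['addx', val]:
--                 cycle, _x = inc_cycle_and_reg(cycle, 2, curr_val=int(val), curr_reg=_x, watcher=_x_register,
--                                               cycles_to_watch=watcher_rules, crt_arr=_crt)
--             case ['noop']:
--                 cycle, _x = inc_cycle_and_reg(cycle, 1, curr_val=0, curr_reg=_x, watcher=_x_register,
--                                               cycles_to_watch=watcher_rules, crt_arr=_crt)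
--
--     return _x_register, _crt
-- ===== SOURCE B (Python) =====
-- def process_program(programm_code: str):
--     # One simulation pass builds a timeline of (cycle, reg) events; the
--     # watcher dict and the CRT list are then derived in two separate passes.
--     reg, cycle = 1, 1
--     timeline = []
--     for line in programm_code.splitlines():
--         parts = line.split()
--         if parts == ['noop']:
--             cycle += 1
--             timeline.append((cycle, reg))
--         elif len(parts) == 2 and parts[0] == 'addx':
--             v = int(parts[1])
--             cycle += 1
--             timeline.append((cycle, reg))
--             reg += v
--             cycle += 1
--             timeline.append((cycle, reg))
--     crt = [1] + [c for (c, r) in timeline if -1 <= (c - 1) % 40 - r <= 1]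
--     watcher = {c: r for (c, r) in timeline if c == 20 or (c - 20) % 40 == 0}
--     return watcher, crt
-- ===== Notes on version B (the rewrite author's own statement) =====
-- stated objective: alternative
-- what changed: A interleaves CRT drawing and watcher recording inside every simulated cycle of one dict+list-mutating pass; B first builds a plain (cycle, register) timeline in a single simulation pass and then derives the CRT list and the watcher dict by two separate filter passes over that timeline.
import Mathlib
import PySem

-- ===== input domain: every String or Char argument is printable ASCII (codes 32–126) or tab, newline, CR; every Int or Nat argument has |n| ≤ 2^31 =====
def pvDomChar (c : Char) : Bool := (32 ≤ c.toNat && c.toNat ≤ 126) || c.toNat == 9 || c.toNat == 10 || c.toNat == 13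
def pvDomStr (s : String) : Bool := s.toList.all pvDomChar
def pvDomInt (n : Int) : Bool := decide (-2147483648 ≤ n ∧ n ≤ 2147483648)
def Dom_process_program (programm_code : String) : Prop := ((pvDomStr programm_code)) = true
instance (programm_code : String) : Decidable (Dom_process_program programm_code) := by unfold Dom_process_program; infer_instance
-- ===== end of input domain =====

-- B rewrites A's interleaved simulation as one pass building a (cycle, reg) timeline
-- plus two derived passes (filter) for the watcher dict and the CRT list; objective: alternative decomposition.

-- ===== PORT A =====
def watcher_rules (check_cycle : Int) : Bool :=
  check_cycle == 20 || PySem.Int.mod (check_cycle - 20) 40 == 0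

def inc_cycle_and_reg (cycle increment curr_val curr_reg : Int)
    (watcher : PySem.Dict Int Int) (crt_arr : List Int) :
    Int × Int × PySem.Dict Int Int × List Int :=
  (PySem.List.pyRange 1 (increment + 1) 1).foldl
    (fun st i =>
      let cycle := st.1 + 1
      let curr_reg := if i == increment then st.2.1 + curr_val else st.2.1
      let crt_arr :=
        if -1 ≤ PySem.Int.mod (cycle - 1) 40 - curr_reg ∧ PySem.Int.mod (cycle - 1) 40 - curr_reg ≤ 1
        then st.2.2.2 ++ [cycle] else st.2.2.2
      let watcher := if watcher_rules cycle then st.2.2.1.insert cycle curr_reg else st.2.2.1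
      (cycle, curr_reg, watcher, crt_arr))
    (cycle, curr_reg, watcher, crt_arr)

-- the loop body of A's `for line in programm_code.splitlines()`
def A_step (st : Int × Int × PySem.Dict Int Int × List Int) (line : String) :
    Int × Int × PySem.Dict Int Int × List Int :=
  match PySem.Str.split₀ line with
  | [a, val] =>
      if a == "addx" then
        match PySem.Int.ofStr? val with
        | some v => inc_cycle_and_reg st.1 2 v st.2.1 st.2.2.1 st.2.2.2
        | none => st      -- Python raises ValueError here; such inputs are excluded by Pre_
      else st
  | ["noop"] => inc_cycle_and_reg st.1 1 0 st.2.1 st.2.2.1 st.2.2.2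
  | _ => st

def process_program (programm_code : String) : (List (Int × Int)) × List Int :=
  let st := (PySem.Str.splitlines programm_code).foldl A_step (1, 1, PySem.Dict.empty, [1])
  (st.2.2.1.items, st.2.2.2)

-- ===== PORT B =====
-- the loop body of B's single timeline-building pass; state = (reg, cycle, timeline)
def B_step (st : Int × Int × List (Int × Int)) (line : String) :
    Int × Int × List (Int × Int) :=
  match PySem.Str.split₀ line with
  | ["noop"] => (st.1, st.2.1 + 1, st.2.2 ++ [(st.2.1 + 1, st.1)])
  | [a, v] =>
      if a == "addx" then
        match PySem.Int.ofStr? v with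
        | some n => (st.1 + n, st.2.1 + 2, st.2.2 ++ [(st.2.1 + 1, st.1), (st.2.1 + 2, st.1 + n)])
        | none => st      -- Python raises ValueError here; such inputs are excluded by Pre_
      else st
  | _ => st

def process_program_alt (programm_code : String) : (List (Int × Int)) × List Int :=
  let st := (PySem.Str.splitlines programm_code).foldl B_step (1, 1, [])
  let timeline := st.2.2
  let crt := 1 :: (timeline.filter
      (fun p => decide (-1 ≤ PySem.Int.mod (p.1 - 1) 40 - p.2 ∧ PySem.Int.mod (p.1 - 1) 40 - p.2 ≤ 1))).map (fun p => p.1)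
  -- timeline cycles are pairwise distinct, so the dict comprehension is this ordered filter
  let watcher := timeline.filter (fun p => p.1 == 20 || PySem.Int.mod (p.1 - 20) 40 == 0)
  (watcher, crt)

-- ===== PRECONDITION & SPEC =====
-- Pre_ excludes exactly the inputs where an `addx` line carries a non-integer operand,
-- on which both Pythons raise ValueError (int(val)).
def lineOk (line : String) : Bool :=
  match PySem.Str.split₀ line with
  | [a, v] => !(a == "addx") || (PySem.Int.ofStr? v).isSome
  | _ => true

def Pre_process_program (programm_code : String) : Prop :=
  (PySem.Str.splitlines programm_code).all lineOk = true
instance (programm_code : String) : Decidable (Pre_process_program programm_code) := by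
  unfold Pre_process_program; infer_instance

def pvWitness_process_program : String := "noop\naddx 3\naddx -5\nnoop"

def Spec_process_program (programm_code : String) (out : (List (Int × Int)) × List Int) : Prop := out = process_program_alt programm_code
instance (programm_code : String) (out : (List (Int × Int)) × List Int) : Decidable (Spec_process_program programm_code out) := by unfold Spec_process_program; infer_instance

-- ===== CLAIM (what is proved, stated in full; the proofs are below) =====
def Claim_equal_process_program : Prop := ∀ (programm_code : String), Dom_process_program programm_code → Pre_process_program programm_code → Spec_process_program programm_code (process_program programm_code)

-- ===== LEMMAS AND PROOFS =====

-- B's two filters, named for the proofs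
def filterC (tl : List (Int × Int)) : List (Int × Int) :=
  tl.filter (fun p => decide (-1 ≤ PySem.Int.mod (p.1 - 1) 40 - p.2 ∧ PySem.Int.mod (p.1 - 1) 40 - p.2 ≤ 1))
def filterW (tl : List (Int × Int)) : List (Int × Int) :=
  tl.filter (fun p => p.1 == 20 || PySem.Int.mod (p.1 - 20) 40 == 0)

lemma filterW_append (a b : List (Int × Int)) : filterW (a ++ b) = filterW a ++ filterW b :=
  List.filter_append ..
lemma filterC_append (a b : List (Int × Int)) : filterC (a ++ b) = filterC a ++ filterC b :=
  List.filter_append ..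

-- inserting a fresh key appends to the dict's item list
lemma insert_append (w : List (Int × Int)) (k v : Int) (h : ∀ p ∈ w, p.1 ≠ k) :
    (PySem.Dict.mk w).insert k v = PySem.Dict.mk (w ++ [(k, v)]) := by
  apply PySem.Dict.ext
  rw [PySem.Dict.items_insert_of_not_contains]
  simp [PySem.Dict.contains_mk]
  intro a b hab
  exact fun he => (h (a, b) hab) (by simp [he])

-- one CPU tick: the conditional dict insert is the filterW of the one event
lemma tickW (cy rv : Int) (w : List (Int × Int)) (hne : ∀ p ∈ w, p.1 ≠ cy + 1) :
    (if watcher_rules (cy + 1) then (PySem.Dict.mk w).insert (cy + 1) rv else PySem.Dict.mk w) =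
      PySem.Dict.mk (w ++ filterW [(cy + 1, rv)]) := by
  simp only [watcher_rules, filterW, List.filter_cons, List.filter_nil]
  split_ifs with h
  · rw [insert_append w (cy + 1) rv hne]
  · simp

-- one CPU tick: the conditional crt append is the filterC of the one event
lemma tickC (cy rv : Int) (crt : List Int) :
    (if -1 ≤ PySem.Int.mod (cy + 1 - 1) 40 - rv ∧ PySem.Int.mod (cy + 1 - 1) 40 - rv ≤ 1
      then crt ++ [cy + 1] else crt) =
      crt ++ (filterC [(cy + 1, rv)]).map (fun p => p.1) := by
  simp only [filterC, List.filter_cons, List.filter_nil, decide_eq_true_eq]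
  split_ifs with h
  · simp
  · simp

lemma inc1_eq (cycle reg : Int) (w : List (Int × Int)) (crt : List Int)
    (hw : ∀ p ∈ w, p.1 ≤ cycle) :
    inc_cycle_and_reg cycle 1 0 reg (PySem.Dict.mk w) crt =
      (cycle + 1, reg,
       PySem.Dict.mk (w ++ filterW [(cycle + 1, reg)]),
       crt ++ (filterC [(cycle + 1, reg)]).map (fun p => p.1)) := by
  have hr2 : PySem.List.pyRange 1 (1 + 1) 1 = [1] := by decide
  have hne1 : ∀ p ∈ w, p.1 ≠ cycle + 1 := fun p hp => by have := hw p hp; omega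
  simp only [inc_cycle_and_reg, hr2, List.foldl_cons, List.foldl_nil, beq_self_eq_true,
    ite_true, add_zero]
  rw [tickW cycle reg w hne1, tickC cycle reg crt]

lemma inc2_eq (cycle reg v : Int) (w : List (Int × Int)) (crt : List Int)
    (hw : ∀ p ∈ w, p.1 ≤ cycle) :
    inc_cycle_and_reg cycle 2 v reg (PySem.Dict.mk w) crt =
      (cycle + 2, reg + v,
       PySem.Dict.mk (w ++ filterW [(cycle + 1, reg), (cycle + 2, reg + v)]),
       crt ++ (filterC [(cycle + 1, reg), (cycle + 2, reg + v)]).map (fun p => p.1)) := by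
  have hr3 : PySem.List.pyRange 1 (2 + 1) 1 = [1, 2] := by decide
  have hne1 : ∀ p ∈ w, p.1 ≠ cycle + 1 := fun p hp => by have := hw p hp; omega
  have hne2 : ∀ p ∈ w ++ filterW [(cycle + 1, reg)], p.1 ≠ cycle + 1 + 1 := by
    intro p hp
    rcases List.mem_append.1 hp with h' | h'
    · have := hw p h'; omega
    · rcases List.mem_singleton.1 (List.mem_of_mem_filter h') with rfl
      show cycle + 1 ≠ cycle + 1 + 1; omega
  simp only [inc_cycle_and_reg, hr3, List.foldl_cons, List.foldl_nil, beq_self_eq_true,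
    ite_true, Int.reduceBEq, Bool.false_eq_true, ite_false]
  rw [tickW cycle reg w hne1, tickC cycle reg crt,
    tickW (cycle + 1) (reg + v) (w ++ filterW [(cycle + 1, reg)]) hne2,
    tickC (cycle + 1) (reg + v) (crt ++ (filterC [(cycle + 1, reg)]).map (fun p => p.1)),
    show [(cycle + 1, reg), (cycle + 2, reg + v)] = [(cycle + 1, reg)] ++ [(cycle + 2, reg + v)] from rfl,
    filterW_append, filterC_append]
  simp [add_assoc]

lemma B_step_acc (reg cycle : Int) (tl : List (Int × Int)) (line : String) :
    B_step (reg, cycle, tl) line =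
      ((B_step (reg, cycle, []) line).1, (B_step (reg, cycle, []) line).2.1,
        tl ++ (B_step (reg, cycle, []) line).2.2) := by
  unfold B_step
  rcases h : PySem.Str.split₀ line with _ | ⟨a, _ | ⟨v, _ | ⟨c, rest⟩⟩⟩
  · simp
  · by_cases ha : a = "noop" <;> simp [ha]
  · by_cases ha : a = "addx"
    · cases hn : PySem.Int.ofStr? v <;> simp [ha, hn]
    · simp [ha]
  · simp

lemma B_foldl_acc (lines : List String) : ∀ (reg cycle : Int) (tl : List (Int × Int)),
    lines.foldl B_step (reg, cycle, tl) =
      ((lines.foldl B_step (reg, cycle, []) ).1,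
       (lines.foldl B_step (reg, cycle, []) ).2.1,
       tl ++ (lines.foldl B_step (reg, cycle, []) ).2.2) := by
  induction lines with
  | nil => intro reg cycle tl; simp
  | cons l ls ih =>
    intro reg cycle tl
    rw [List.foldl_cons, List.foldl_cons, B_step_acc]
    rw [ih (B_step (reg, cycle, []) l).1 (B_step (reg, cycle, []) l).2.1
          (tl ++ (B_step (reg, cycle, []) l).2.2),
        ih (B_step (reg, cycle, []) l).1 (B_step (reg, cycle, []) l).2.1
          (B_step (reg, cycle, []) l).2.2]
    simp

-- one source line: A's step is B's step plus the two derived filters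
lemma step_rel (cycle reg : Int) (w : List (Int × Int)) (crt : List Int) (line : String)
    (hw : ∀ p ∈ w, p.1 ≤ cycle) (hok : lineOk line = true) :
    A_step (cycle, reg, PySem.Dict.mk w, crt) line =
      ((B_step (reg, cycle, []) line).2.1, (B_step (reg, cycle, []) line).1,
       PySem.Dict.mk (w ++ filterW (B_step (reg, cycle, []) line).2.2),
       crt ++ (filterC (B_step (reg, cycle, []) line).2.2).map (fun p => p.1)) := by
  unfold A_step B_step lineOk at *
  rcases h : PySem.Str.split₀ line with _ | ⟨a, _ | ⟨v, _ | ⟨c, rest⟩⟩⟩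
  · simp [filterW, filterC]
  · by_cases ha : a = "noop"
    · subst ha
      simp only [List.nil_append]
      exact inc1_eq cycle reg w crt hw
    · simp [ha, filterW, filterC]
  · rw [h] at hok
    by_cases ha : a = "addx"
    · subst ha
      rcases hn : PySem.Int.ofStr? v with _ | n
      · simp [hn] at hok
      · simp only [hn, List.nil_append]
        exact inc2_eq cycle reg n w crt hw
    · simp [ha, filterW, filterC]
  · simp [filterW, filterC]

lemma step_bounds (cycle reg : Int) (line : String) :
    cycle ≤ (B_step (reg, cycle, []) line).2.1 ∧
      ∀ p ∈ (B_step (reg, cycle, []) line).2.2, p.1 ≤ (B_step (reg, cycle, []) line).2.1 ∧ cycle < p.1 := by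
  unfold B_step
  rcases h : PySem.Str.split₀ line with _ | ⟨a, _ | ⟨v, _ | ⟨c, rest⟩⟩⟩
  · simp
  · by_cases ha : a = "noop" <;> simp [ha]
  · by_cases ha : a = "addx"
    · cases hn : PySem.Int.ofStr? v <;> simp [ha, hn]
    · simp [ha]
  · simp

lemma main_loop (lines : List String) : ∀ (cycle reg : Int) (w : List (Int × Int)) (crt : List Int),
    (∀ p ∈ w, p.1 ≤ cycle) → lines.all lineOk = true →
    lines.foldl A_step (cycle, reg, PySem.Dict.mk w, crt) =
      ((lines.foldl B_step (reg, cycle, []) ).2.1,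
       (lines.foldl B_step (reg, cycle, []) ).1,
       PySem.Dict.mk (w ++ filterW ((lines.foldl B_step (reg, cycle, []) ).2.2)),
       crt ++ (filterC ((lines.foldl B_step (reg, cycle, []) ).2.2)).map (fun p => p.1)) := by
  induction lines with
  | nil => intro cycle reg w crt hw hok; simp [filterW, filterC]
  | cons l ls ih =>
    intro cycle reg w crt hw hok
    simp only [List.all_cons, Bool.and_eq_true] at hok
    rw [List.foldl_cons, List.foldl_cons, step_rel cycle reg w crt l hw hok.1]
    obtain ⟨hcy, hev⟩ := step_bounds cycle reg l
    have hw' : ∀ p ∈ w ++ filterW (B_step (reg, cycle, []) l).2.2,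
        p.1 ≤ (B_step (reg, cycle, []) l).2.1 := by
      intro p hp
      rcases List.mem_append.1 hp with h' | h'
      · have := hw p h'; omega
      · exact (hev p (List.mem_of_mem_filter h')).1
    rw [ih (B_step (reg, cycle, []) l).2.1 (B_step (reg, cycle, []) l).1
          (w ++ filterW (B_step (reg, cycle, []) l).2.2) _ hw' hok.2]
    have hb : ls.foldl B_step (B_step (reg, cycle, []) l) =
        ((ls.foldl B_step ((B_step (reg, cycle, []) l).1, (B_step (reg, cycle, []) l).2.1, []) ).1,
         (ls.foldl B_step ((B_step (reg, cycle, []) l).1, (B_step (reg, cycle, []) l).2.1, []) ).2.1,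
         (B_step (reg, cycle, []) l).2.2 ++
           (ls.foldl B_step ((B_step (reg, cycle, []) l).1, (B_step (reg, cycle, []) l).2.1, []) ).2.2) := by
      rw [← B_foldl_acc]
    rw [hb]
    simp [filterW_append, filterC_append]

-- ===== VERDICT (by name: the statement is the Claim_ definition above) =====
theorem process_program_spec : Claim_equal_process_program := by
  intro code _hdom hpre
  unfold Spec_process_program process_program process_program_alt
  have hemp : PySem.Dict.empty = PySem.Dict.mk ([] : List (Int × Int)) := rfl
  rw [hemp, main_loop (PySem.Str.splitlines code) 1 1 [] [1] (by simp) hpre]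
  simp [filterC, filterW]
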